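-- pv_equiv track=rewrite | github.com/stephane-delire/Memoire-implementation | cqa/sources2/rewriter.py | _build_attack_graph
-- ===== SOURCE A (Python) =====
-- def _build_attack_graph(atoms):
--     """
--     Construit un graphe d'attaque :
--     Chaque atome peut attaquer un autre si une de ses clés permet de découvrir une clé de l'autre.
--     """
--
--     # Récupère les dépendances fonctionnelles des atomes positifs (clé -> tous les attributs)
--     fds = []
--     for is_negated, _, key_len, args in atoms:
--         if is_negated:
--             continue
--         key = set(args[:key_len])
--         fds.append((key, set(args)))
--
--     def closure(var):
--         """Retourne tous les attributs atteignables depuis une variable via les FD."""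
--         reachable = {var}
--         changed = True
--         while changed:
--             changed = False
--             for left, right in fds:
--                 if left <= reachable and not right <= reachable:
--                     reachable |= right
--                     changed = True
--         return reachable
--
--     # Initialisation du graphe (index de l'atome -> set des index attaqués)
--     graph = {i: set() for i in range(len(atoms))}
--
--     for i, (_, _, key_len_i, args_i) in enumerate(atoms):
--         key_i = set(args_i[:key_len_i])
--
--         for var in key_i:
--             reachable = closure(var)
--
--             for j, (_, _, key_len_j, args_j) in enumerate(atoms):
--                 if i == j:
--                     continue
--
--                 key_j = set(args_j[:key_len_j])
--                 for key_attr in key_j: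
--                     if key_attr not in key_i and key_attr in reachable:
--                         graph[i].add(j)
--                         break  # un seul arc suffit
--
--     return graph
-- ===== SOURCE B (Python) =====
-- def _build_attack_graph(atoms):
--     # B: worklist saturation -- each FD fires at most once and is then retired from
--     # the pending list (no changed-flag full rescans); one closure per distinct key
--     # variable computed up front; attack test is one set-disjointness check per pair.
--     keys = [set(args[:key_len]) for _, _, key_len, args in atoms]
--     fds = [(set(args[:key_len]), set(args))
--            for is_negated, _, key_len, args in atoms if not is_negated]
--
--     def closure(var):
--         closed = {var}
--         scanned, pending = [], list(fds)
--         while pending: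
--             left, right = pending[0]
--             if left <= closed:
--                 closed |= right
--                 pending = scanned + pending[1:]
--                 scanned = []
--             else:
--                 scanned = scanned + [pending[0]]
--                 pending = pending[1:]
--         return closed
--
--     variables = set()
--     for key in keys:
--         variables |= key
--     closures = {var: closure(var) for var in variables}
--
--     graph = {}
--     for i, key_i in enumerate(keys):
--         attacked = set()
--         for var in key_i:
--             discoverable = closures[var] - key_i
--             for j, key_j in enumerate(keys):
--                 if j != i and not key_j.isdisjoint(discoverable):
--                     attacked.add(j)
--         graph[i] = attacked
--     return graph
-- ===== Notes on version B (the rewrite author's own statement) =====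
-- stated objective: faster
-- what changed: B replaces A's changed-flag fixpoint (which rescans and re-tests every FD in every round, and recomputes the whole closure for every (atom, key-variable) pair) by a worklist saturation in which each FD fires at most once and is then retired from the pending list, computes exactly one such closure per distinct key variable up front, and decides each attack with a single set-disjointness test instead of A's innermost per-attribute loop that rebuilds every key set.
import Mathlib
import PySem

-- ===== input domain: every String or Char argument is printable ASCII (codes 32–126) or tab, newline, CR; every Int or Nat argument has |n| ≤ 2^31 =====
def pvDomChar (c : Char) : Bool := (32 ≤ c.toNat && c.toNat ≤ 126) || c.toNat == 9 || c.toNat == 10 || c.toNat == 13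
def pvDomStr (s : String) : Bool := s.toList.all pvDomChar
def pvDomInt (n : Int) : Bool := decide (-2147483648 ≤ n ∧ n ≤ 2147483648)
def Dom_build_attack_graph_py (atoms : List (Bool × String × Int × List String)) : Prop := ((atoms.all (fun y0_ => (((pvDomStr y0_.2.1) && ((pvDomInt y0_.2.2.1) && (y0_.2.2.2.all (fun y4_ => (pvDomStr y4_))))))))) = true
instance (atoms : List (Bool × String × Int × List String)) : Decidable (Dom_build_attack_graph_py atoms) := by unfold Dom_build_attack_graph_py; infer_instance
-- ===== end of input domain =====

-- B replaces A's changed-flag fixpoint rounds by a worklist saturation that retires each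
-- FD from the pending list once it fires, computes one closure per distinct key variable
-- up front, and tests attacks with one set-disjointness check per pair; same return value.

-- `set(args[:key_len])` — the key set of an atom (the same Python expression in A and B)
def pvKeyOf (a : Bool × String × Int × List String) : PySem.Set String :=
  PySem.Set.ofList (PySem.List.slice a.2.2.2 none (some a.2.2.1))

-- ===== PORT A =====

-- one run of A's `for left, right in fds:` body over state (reachable, changed)
def pvPassA (fds : List (PySem.Set String × PySem.Set String)) (st : PySem.Set String × Bool) :
    PySem.Set String × Bool :=
  fds.foldl (fun acc fd =>
    if fd.1.issubset acc.1 && !(fd.2.issubset acc.1) then (acc.1.union fd.2, true) else acc) st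

-- A's inner `closure(var)` while-loop (called with reachable = {var})
def pvClosA (fds : List (PySem.Set String × PySem.Set String)) (reachable : PySem.Set String) :
    PySem.Set String :=
  let p := pvPassA fds (reachable, false)
  if h : p.2 = true then pvClosA fds p.1 else p.1
termination_by fds.countP (fun fd => !(fd.2.issubset reachable))
decreasing_by
  -- inline termination argument: a changed pass strictly shrinks the number of
  -- FDs whose right side is not yet contained in `reachable`
  have hext : ∀ (l : List (PySem.Set String × PySem.Set String))
      (st : PySem.Set String × Bool), ∀ x ∈ st.1, x ∈ (pvPassA l st).1 := by
    intro l
    induction l with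
    | nil => intro st x hx; exact hx
    | cons fd rest ih =>
      intro st x hx
      show x ∈ (pvPassA rest
        (if fd.1.issubset st.1 && !(fd.2.issubset st.1) then (st.1.union fd.2, true) else st)).1
      split
      · exact ih _ x ((PySem.Set.mem_union _ _ _).mpr (Or.inl hx))
      · exact ih st x hx
  have htrue : ∀ (l : List (PySem.Set String × PySem.Set String))
      (st : PySem.Set String × Bool), st.2 = true → (pvPassA l st).2 = true := by
    intro l
    induction l with
    | nil => intro st hst; exact hst
    | cons fd rest ih =>
      intro st hst
      show (pvPassA rest
        (if fd.1.issubset st.1 && !(fd.2.issubset st.1) then (st.1.union fd.2, true) else st)).2 = true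
      split
      · exact ih _ rfl
      · exact ih st hst
  have hfired : ∀ (l : List (PySem.Set String × PySem.Set String)) (r : PySem.Set String),
      (pvPassA l (r, false)).2 = true →
      ∃ fd ∈ l, fd.2.issubset r = false ∧ ∀ x ∈ fd.2, x ∈ (pvPassA l (r, false)).1 := by
    intro l
    induction l with
    | nil => intro r hr; exact absurd hr (by simp [pvPassA])
    | cons fd rest ih =>
      intro r hr
      by_cases hg : (fd.1.issubset r && !(fd.2.issubset r)) = true
      · refine ⟨fd, List.mem_cons_self, ?_, ?_⟩
        · have := (Bool.and_eq_true _ _).mp hg |>.2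
          simpa using this
        · intro x hx
          show x ∈ (pvPassA rest
            (if fd.1.issubset r && !(fd.2.issubset r) then (r.union fd.2, true) else (r, false))).1
          rw [if_pos hg]
          exact hext rest _ x ((PySem.Set.mem_union _ _ _).mpr (Or.inr hx))
      · have hstep : pvPassA (fd :: rest) (r, false) = pvPassA rest (r, false) := by
          show pvPassA rest
            (if fd.1.issubset r && !(fd.2.issubset r) then (r.union fd.2, true) else (r, false)) = _
          rw [if_neg hg]
        rw [hstep] at hr ⊢
        obtain ⟨fd', hmem, hfd⟩ := ih r hr
        exact ⟨fd', List.mem_cons_of_mem _ hmem, hfd⟩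
  have hlt : ∀ {α : Type} (l : List α) (p q : α → Bool),
      (∀ x ∈ l, p x = true → q x = true) → ∀ a ∈ l, q a = true → p a = false →
      l.countP p < l.countP q := by
    intro α l p q hpq a ha hq hp
    induction l with
    | nil => simp at ha
    | cons b rest ih =>
      rcases List.mem_cons.mp ha with rfl | hmem
      · have : rest.countP p ≤ rest.countP q :=
          List.countP_mono_left (fun x hx => hpq x (List.mem_cons_of_mem _ hx))
        simp [hp, hq]; omega
      · have hb : (if p b = true then 1 else 0) ≤ (if q b = true then 1 else 0) := by
          by_cases hpb : p b = true
          · simp [hpb, hpq b List.mem_cons_self hpb]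
          · simp [hpb]
        have := ih (fun x hx => hpq x (List.mem_cons_of_mem _ hx)) hmem
        simp [List.countP_cons]; split_ifs at hb ⊢ <;> omega
  obtain ⟨fd, hmem, hfalse, hsub⟩ := hfired fds reachable h
  refine hlt fds _ _ ?_ fd hmem ?_ ?_
  · intro x hx hpx
    simp only [Bool.not_eq_eq_eq_not, Bool.not_true] at hpx ⊢
    by_contra hc
    have hsr : x.2.issubset reachable = true := by
      cases hxr : x.2.issubset reachable with
      | true => rfl
      | false => simp [hxr] at hc
    have hsub2 := (PySem.Set.issubset_iff _ _).mp hsr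
    have : x.2.issubset (pvPassA fds (reachable, false)).1 = true :=
      (PySem.Set.issubset_iff _ _).mpr
        (fun y hy => hext fds (reachable, false) y (hsub2 y hy))
    simp [this] at hpx
  · simp [hfalse]
  · simp [(PySem.Set.issubset_iff _ _).mpr hsub]

def build_attack_graph_py (atoms : List (Bool × String × Int × List String)) :
    List (Int × List Int) :=
  let fds : List (PySem.Set String × PySem.Set String) :=
    atoms.foldl (fun fds a =>
      if a.1 then fds
      else fds ++ [(pvKeyOf a, PySem.Set.ofList a.2.2.2)]) []
  let graph0 : PySem.Dict Int (PySem.Set Int) :=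
    (PySem.List.pyRange 0 (atoms.length : Int)).foldl
      (fun d i => d.insert i PySem.Set.empty) PySem.Dict.empty
  let graph :=
    (PySem.List.enumerate atoms).foldl (fun g p =>
      let key_i := pvKeyOf p.2
      key_i.foldl (fun g var =>
        let reachable := pvClosA fds (PySem.Set.ofList [var])
        (PySem.List.enumerate atoms).foldl (fun g q =>
          if p.1 = q.1 then g
          else
            -- `for key_attr in key_j: if …: graph[i].add(j); break`
            if (pvKeyOf q.2).any (fun attr => !(key_i.contains attr) && reachable.contains attr)
            then g.modify p.1 PySem.Set.empty (fun s => s.add q.1) else g) g) g) graph0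
  graph.items

-- ===== PORT B =====

-- B's `closure(var)` loop: state (scanned, pending, closed); the head FD fires and is
-- retired (pending becomes scanned + rest, scanned resets) or is moved onto scanned
def pvSaturate (scanned pending : List (PySem.Set String × PySem.Set String))
    (closed : PySem.Set String) : PySem.Set String :=
  match pending with
  | [] => closed
  | fd :: rest =>
      if fd.1.issubset closed then pvSaturate [] (scanned ++ rest) (closed.union fd.2)
      else pvSaturate (scanned ++ [fd]) rest closed
termination_by (scanned.length + pending.length, pending.length)
decreasing_by
  all_goals exact Prod.lex_def.mpr (by
    simp only [List.length_append, List.length_cons, List.length_nil, List.length_singleton]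
    omega)

def build_attack_graph_py_alt (atoms : List (Bool × String × Int × List String)) :
    List (Int × List Int) :=
  let keys : List (PySem.Set String) := atoms.map pvKeyOf
  let fds : List (PySem.Set String × PySem.Set String) :=
    (atoms.filter (fun a => !a.1)).map (fun a => (pvKeyOf a, PySem.Set.ofList a.2.2.2))
  let varSet : PySem.Set String :=
    keys.foldl (fun v key => v.union key) PySem.Set.empty
  let closures : PySem.Dict String (PySem.Set String) :=
    varSet.foldl (fun d var =>
      d.insert var (pvSaturate [] fds (PySem.Set.ofList [var]))) PySem.Dict.empty
  let graph : PySem.Dict Int (PySem.Set Int) :=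
    (PySem.List.enumerate keys).foldl (fun g p =>
      let attacked : PySem.Set Int :=
        p.2.foldl (fun att var =>
          -- `closures[var]` is always present here, so `getD` is exact
          let discoverable := (closures.getD var PySem.Set.empty).diff p.2
          (PySem.List.enumerate keys).foldl (fun att q =>
            if decide (q.1 ≠ p.1) && !(q.2.isdisjoint discoverable)
            then att.add q.1 else att) att) PySem.Set.empty
      g.insert p.1 attacked) PySem.Dict.empty
  graph.items

-- ===== PRECONDITION & SPEC =====
def Spec_build_attack_graph_py (atoms : List (Bool × String × Int × List String)) (out : List (Int × List Int)) : Prop := out = build_attack_graph_py_alt atoms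
instance (atoms : List (Bool × String × Int × List String)) (out : List (Int × List Int)) : Decidable (Spec_build_attack_graph_py atoms out) := by unfold Spec_build_attack_graph_py; infer_instance

-- ===== CLAIM (what is proved, stated in full; the proofs are below) =====
def Claim_equal_build_attack_graph_py : Prop := ∀ (atoms : List (Bool × String × Int × List String)), Dom_build_attack_graph_py atoms → Spec_build_attack_graph_py atoms (build_attack_graph_py atoms)

-- ===== LEMMAS AND PROOFS =====

-- single-pass facts about A's loop body
theorem pvPassA_cons (fd : PySem.Set String × PySem.Set String)
    (rest : List (PySem.Set String × PySem.Set String)) (st : PySem.Set String × Bool) :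
    pvPassA (fd :: rest) st =
      pvPassA rest
        (if fd.1.issubset st.1 && !(fd.2.issubset st.1) then (st.1.union fd.2, true) else st) := rfl

theorem pvPassA_ext (fds : List (PySem.Set String × PySem.Set String))
    (st : PySem.Set String × Bool) : ∀ x ∈ st.1, x ∈ (pvPassA fds st).1 := by
  induction fds generalizing st with
  | nil => simp [pvPassA]
  | cons fd rest ih =>
    intro x hx
    rw [pvPassA_cons]
    split
    · exact ih _ x ((PySem.Set.mem_union _ _ _).mpr (Or.inl hx))
    · exact ih st x hx

theorem pvPassA_true (fds : List (PySem.Set String × PySem.Set String))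
    (st : PySem.Set String × Bool) (h : st.2 = true) : (pvPassA fds st).2 = true := by
  induction fds generalizing st with
  | nil => simpa [pvPassA]
  | cons fd rest ih =>
    rw [pvPassA_cons]
    split
    · exact ih _ rfl
    · exact ih st h

-- membership inclusion between (internal) sets, and "S is closed under all FDs"
def pvSub (s t : PySem.Set String) : Prop := ∀ x ∈ s, x ∈ t

def pvSat (fds : List (PySem.Set String × PySem.Set String)) (S : PySem.Set String) : Prop :=
  ∀ fd ∈ fds, pvSub fd.1 S → pvSub fd.2 S

theorem pvUnion_ext (s t : PySem.Set String) : pvSub s (s.union t) :=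
  fun x hx => (PySem.Set.mem_union _ _ _).mpr (Or.inl hx)

-- ---- A's closure computes the least FD-closed superset ----

theorem pvPassA_nofire (fds : List (PySem.Set String × PySem.Set String))
    (st : PySem.Set String × Bool) (h : (pvPassA fds st).2 = false) : pvPassA fds st = st := by
  induction fds generalizing st with
  | nil => simp [pvPassA]
  | cons fd rest ih =>
    rw [pvPassA_cons] at h ⊢
    by_cases hg : (fd.1.issubset st.1 && !(fd.2.issubset st.1)) = true
    · rw [if_pos hg] at h
      have := pvPassA_true rest (st.1.union fd.2, true) rfl
      simp [this] at h
    · rw [if_neg hg] at h ⊢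
      exact ih st h

theorem pvPassA_sat (fds : List (PySem.Set String × PySem.Set String)) (r : PySem.Set String)
    (h : (pvPassA fds (r, false)).2 = false) : pvSat fds r := by
  induction fds with
  | nil => intro fd hm; simp at hm
  | cons fd rest ih =>
    rw [pvPassA_cons] at h
    by_cases hg : (fd.1.issubset r && !(fd.2.issubset r)) = true
    · rw [if_pos hg] at h
      have := pvPassA_true rest (r.union fd.2, true) rfl
      simp [this] at h
    · rw [if_neg hg] at h
      intro fd' hm
      rcases List.mem_cons.mp hm with rfl | hm'
      · intro hsub
        have h1 : fd'.1.issubset r = true := (PySem.Set.issubset_iff _ _).mpr hsub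
        cases h2 : fd'.2.issubset r with
        | false => exact absurd (by simp [h1, h2]) hg
        | true => exact (PySem.Set.issubset_iff _ _).mp h2
      · exact ih h fd' hm'

theorem pvPassA_keep (fds : List (PySem.Set String × PySem.Set String)) (S : PySem.Set String)
    (st : PySem.Set String × Bool) (hS : pvSat fds S) (hsub : pvSub st.1 S) :
    pvSub (pvPassA fds st).1 S := by
  induction fds generalizing st with
  | nil => simpa [pvPassA]
  | cons fd rest ih =>
    have hS' : pvSat rest S := fun fd' hm => hS fd' (List.mem_cons_of_mem _ hm)
    rw [pvPassA_cons]
    by_cases hg : (fd.1.issubset st.1 && !(fd.2.issubset st.1)) = true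
    · rw [if_pos hg]
      refine ih _ hS' ?_
      intro x hx
      rcases (PySem.Set.mem_union _ _ _).mp hx with hx | hx
      · exact hsub x hx
      · have h1 : pvSub fd.1 st.1 :=
          (PySem.Set.issubset_iff _ _).mp ((Bool.and_eq_true _ _).mp hg).1
        exact hS fd List.mem_cons_self (fun y hy => hsub y (h1 y hy)) x hx
    · rw [if_neg hg]
      exact ih st hS' hsub

theorem pvClosA_ext (fds : List (PySem.Set String × PySem.Set String)) (r : PySem.Set String) :
    pvSub r (pvClosA fds r) := by
  fun_induction pvClosA fds r with
  | case1 r p hp ih =>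
    exact fun x hx => ih x (pvPassA_ext fds (r, false) x hx)
  | case2 r p hp =>
    exact fun x hx => pvPassA_ext fds (r, false) x hx

theorem pvClosA_sat (fds : List (PySem.Set String × PySem.Set String)) (r : PySem.Set String) :
    pvSat fds (pvClosA fds r) := by
  fun_induction pvClosA fds r with
  | case1 r p hp ih => exact ih
  | case2 r p hp =>
    have hfalse : (pvPassA fds (r, false)).2 = false := by simpa using hp
    have h1 : pvPassA fds (r, false) = (r, false) := pvPassA_nofire _ _ hfalse
    show pvSat fds (pvPassA fds (r, false)).1
    rw [h1]
    exact pvPassA_sat fds r hfalse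

theorem pvClosA_min (fds : List (PySem.Set String × PySem.Set String)) (S : PySem.Set String)
    (hS : pvSat fds S) (r : PySem.Set String) : pvSub r S → pvSub (pvClosA fds r) S := by
  fun_induction pvClosA fds r with
  | case1 r p hp ih =>
    intro h
    exact ih (pvPassA_keep fds S (r, false) hS h)
  | case2 r p hp =>
    intro h
    exact pvPassA_keep fds S (r, false) hS h

-- ---- B's worklist saturation computes the least FD-closed superset too ----

theorem pvSaturate_ext (scanned pending : List (PySem.Set String × PySem.Set String))
    (closed : PySem.Set String) : pvSub closed (pvSaturate scanned pending closed) := by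
  fun_induction pvSaturate scanned pending closed with
  | case1 => exact fun x hx => hx
  | case2 scanned closed fd rest hfire ih =>
    exact fun x hx => ih x (pvUnion_ext _ _ x hx)
  | case3 scanned closed fd rest hfire ih => exact ih

theorem pvSaturate_min (scanned pending : List (PySem.Set String × PySem.Set String))
    (closed : PySem.Set String) (S : PySem.Set String)
    (hS : ∀ fd ∈ scanned ++ pending, pvSub fd.1 S → pvSub fd.2 S) (hsub : pvSub closed S) :
    pvSub (pvSaturate scanned pending closed) S := by
  fun_induction pvSaturate scanned pending closed with
  | case1 => exact hsub
  | case2 scanned closed fd rest hfire ih =>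
    refine ih (fun fd' hm => hS fd' ?_) ?_
    · rcases List.mem_append.mp (by simpa using hm) with h | h
      · exact List.mem_append.mpr (Or.inl h)
      · exact List.mem_append.mpr (Or.inr (List.mem_cons_of_mem _ h))
    · intro x hx
      rcases (PySem.Set.mem_union _ _ _).mp hx with hx | hx
      · exact hsub x hx
      · have hl : pvSub fd.1 closed := (PySem.Set.issubset_iff _ _).mp hfire
        exact hS fd (List.mem_append.mpr (Or.inr List.mem_cons_self))
          (fun y hy => hsub y (hl y hy)) x hx
  | case3 scanned closed fd rest hfire ih =>
    refine ih (fun fd' hm => hS fd' ?_) hsub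
    rcases List.mem_append.mp hm with h | h
    · rcases List.mem_append.mp h with h' | h'
      · exact List.mem_append.mpr (Or.inl h')
      · exact List.mem_append.mpr (Or.inr (List.mem_cons.mpr (Or.inl (by simpa using h'))))
    · exact List.mem_append.mpr (Or.inr (List.mem_cons_of_mem _ h))

theorem pvSaturate_sat (scanned pending : List (PySem.Set String × PySem.Set String))
    (closed : PySem.Set String)
    (hsc : ∀ fd ∈ scanned, fd.1.issubset closed = false) :
    ∀ fd ∈ scanned ++ pending,
      pvSub fd.1 (pvSaturate scanned pending closed) →
      pvSub fd.2 (pvSaturate scanned pending closed) := by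
  fun_induction pvSaturate scanned pending closed with
  | case1 scanned closed =>
    intro fd hm hsub
    have := hsc fd (by simpa using hm)
    rw [(PySem.Set.issubset_iff _ _).mpr hsub] at this
    cases this
  | case2 scanned closed fd0 rest hfire ih =>
    intro fd hm hsub
    rcases List.mem_append.mp hm with h | h
    · exact ih (fun fd' hm' => absurd hm' (by simp))
        fd (by simpa using List.mem_append.mpr (Or.inl h)) hsub
    · rcases List.mem_cons.mp h with rfl | h'
      · exact fun x hx =>
          pvSaturate_ext [] (scanned ++ rest) (closed.union fd.2) x
            ((PySem.Set.mem_union _ _ _).mpr (Or.inr hx))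
      · exact ih (fun fd' hm' => absurd hm' (by simp))
          fd (by simpa using List.mem_append.mpr (Or.inr h')) hsub
  | case3 scanned closed fd0 rest hfire ih =>
    intro fd hm hsub
    have hsc' : ∀ fd' ∈ scanned ++ [fd0], fd'.1.issubset closed = false := by
      intro fd' hm'
      rcases List.mem_append.mp hm' with h | h
      · exact hsc fd' h
      · rw [List.mem_singleton.mp h]
        exact Bool.eq_false_iff.mpr hfire
    refine ih hsc' fd ?_ hsub
    rcases List.mem_append.mp hm with h | h
    · exact List.mem_append.mpr (Or.inl (List.mem_append.mpr (Or.inl h)))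
    · rcases List.mem_cons.mp h with rfl | h'
      · exact List.mem_append.mpr (Or.inl (List.mem_append.mpr (Or.inr List.mem_cons_self)))
      · exact List.mem_append.mpr (Or.inr h')

-- A's value of `closure(var)` and B's
def pvReachA (fds : List (PySem.Set String × PySem.Set String)) (var : String) :
    PySem.Set String := pvClosA fds (PySem.Set.ofList [var])

def pvReachB (fds : List (PySem.Set String × PySem.Set String)) (var : String) :
    PySem.Set String := pvSaturate [] fds (PySem.Set.ofList [var])

-- the two closure computations agree on membership
theorem pvClos_eq (fds : List (PySem.Set String × PySem.Set String)) (r0 : PySem.Set String)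
    (x : String) : x ∈ pvClosA fds r0 ↔ x ∈ pvSaturate [] fds r0 := by
  constructor
  · intro hx
    exact pvClosA_min fds _
      (fun fd hm => pvSaturate_sat [] fds r0 (fun fd' hm' => absurd hm' (by simp))
        fd (by simpa using hm)) r0
      (pvSaturate_ext [] fds r0) x hx
  · intro hx
    exact pvSaturate_min [] fds r0 _
      (fun fd hm => pvClosA_sat fds r0 fd (by simpa using hm))
      (pvClosA_ext fds r0) x hx

-- countP helper for A's termination bookkeeping lives inline in pvClosA; nothing else uses it

-- ---- the two main loops build the same dict ----

-- B's `fds` list; A's foldl-with-append builds the same list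
def pvFdsOf (atoms : List (Bool × String × Int × List String)) :
    List (PySem.Set String × PySem.Set String) :=
  (atoms.filter (fun a => !a.1)).map (fun a => (pvKeyOf a, PySem.Set.ofList a.2.2.2))

theorem pvFdsA_eq (atoms : List (Bool × String × Int × List String)) :
    atoms.foldl (fun fds a =>
      if a.1 then fds else fds ++ [(pvKeyOf a, PySem.Set.ofList a.2.2.2)]) [] = pvFdsOf atoms := by
  rw [PySem.List.foldl_congr_mem atoms _
    (fun acc a => if !a.1 then acc ++ [(pvKeyOf a, PySem.Set.ofList a.2.2.2)] else acc) []
    (by intro acc a _; cases h : a.1 <;> simp [h])]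
  rw [PySem.List.foldl_append_if (fun a => !a.1) _ atoms []]
  simp [pvFdsOf]

-- A's whole per-atom step, written out (the port's body after zeta reduction)
def pvStepA (fds : List (PySem.Set String × PySem.Set String))
    (atoms : List (Bool × String × Int × List String))
    (g : PySem.Dict Int (PySem.Set Int)) (p : Int × (Bool × String × Int × List String)) :
    PySem.Dict Int (PySem.Set Int) :=
  (pvKeyOf p.2).foldl (fun g var =>
    (PySem.List.enumerate atoms).foldl (fun g q =>
      if p.1 = q.1 then g
      else
        if (pvKeyOf q.2).any (fun attr =>
             !((pvKeyOf p.2).contains attr) && (pvReachA fds var).contains attr)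
        then g.modify p.1 PySem.Set.empty (fun s => s.add q.1) else g) g) g

theorem pvPortA_eq (atoms : List (Bool × String × Int × List String)) :
    build_attack_graph_py atoms =
      ((PySem.List.enumerate atoms).foldl
        (pvStepA (pvFdsOf atoms) atoms)
        ((PySem.List.pyRange 0 (atoms.length : Int)).foldl
          (fun d i => d.insert i PySem.Set.empty) PySem.Dict.empty)).items := by
  show ((PySem.List.enumerate atoms).foldl
        (pvStepA (atoms.foldl (fun fds a =>
          if a.1 then fds else fds ++ [(pvKeyOf a, PySem.Set.ofList a.2.2.2)]) []) atoms)
        ((PySem.List.pyRange 0 (atoms.length : Int)).foldl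
          (fun d i => d.insert i PySem.Set.empty) PySem.Dict.empty)).items = _
  rw [pvFdsA_eq]

-- one inner (j-)loop of A, on the dict: only key i is touched, by a set-fold
theorem pvInnerA_getD_ne {α : Type} (L : List (Int × α)) (i : Int) (h : Int × α → Bool)
    (g : PySem.Dict Int (PySem.Set Int)) (k : Int) (hk : k ≠ i) :
    (L.foldl (fun g q =>
      if i = q.1 then g
      else if h q then g.modify i PySem.Set.empty (fun s => s.add q.1) else g) g).getD k
        PySem.Set.empty = g.getD k PySem.Set.empty := by
  induction L generalizing g with
  | nil => rfl
  | cons q L ih =>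
    rw [List.foldl_cons]
    split
    · exact ih g
    · split
      · rw [ih _, PySem.Dict.getD_modify_of_ne g PySem.Set.empty _ hk]
      · exact ih g

theorem pvInnerA_getD_self {α : Type} (L : List (Int × α)) (i : Int) (h : Int × α → Bool)
    (g : PySem.Dict Int (PySem.Set Int)) :
    (L.foldl (fun g q =>
      if i = q.1 then g
      else if h q then g.modify i PySem.Set.empty (fun s => s.add q.1) else g) g).getD i
        PySem.Set.empty =
    L.foldl (fun s q => if decide (i ≠ q.1) && h q then s.add q.1 else s)
      (g.getD i PySem.Set.empty) := by
  induction L generalizing g with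
  | nil => rfl
  | cons q L ih =>
    rw [List.foldl_cons, List.foldl_cons]
    by_cases he : i = q.1
    · rw [if_pos he]
      have : (decide (i ≠ q.1) && h q) = false := by simp [he]
      rw [this, if_neg (by simp)]
      exact ih g
    · rw [if_neg he]
      have hd : decide (i ≠ q.1) = true := by simp [he]
      by_cases hh : h q = true
      · rw [if_pos hh, ih, PySem.Dict.getD_modify_self, hd, hh]
        simp
      · rw [if_neg hh, ih]
        have : (decide (i ≠ q.1) && h q) = false := by simp [hh]
        rw [this, if_neg (by simp)]

theorem pvInnerA_keys {α : Type} (L : List (Int × α)) (i : Int) (h : Int × α → Bool)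
    (g : PySem.Dict Int (PySem.Set Int)) (hc : g.contains i = true) :
    (L.foldl (fun g q =>
      if i = q.1 then g
      else if h q then g.modify i PySem.Set.empty (fun s => s.add q.1) else g) g).keys =
      g.keys := by
  induction L generalizing g with
  | nil => rfl
  | cons q L ih =>
    rw [List.foldl_cons]
    split
    · exact ih g hc
    · split
      · rw [ih _ (by rw [PySem.Dict.contains_modify]; simp [hc]),
            PySem.Dict.keys_modify, PySem.Dict.keys_insert_of_contains _ _ hc]
      · exact ih g hc

-- the var-loop of A over any list of variables
theorem pvVarsA_getD_ne {α : Type} (L : List (Int × α)) (i : Int)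
    (hv : String → Int × α → Bool) (vars : List String)
    (g : PySem.Dict Int (PySem.Set Int)) (k : Int) (hk : k ≠ i) :
    (vars.foldl (fun g var => L.foldl (fun g q =>
      if i = q.1 then g
      else if hv var q then g.modify i PySem.Set.empty (fun s => s.add q.1) else g) g) g).getD k
        PySem.Set.empty = g.getD k PySem.Set.empty := by
  induction vars generalizing g with
  | nil => rfl
  | cons v vs ih => rw [List.foldl_cons, ih, pvInnerA_getD_ne _ _ _ _ _ hk]

theorem pvVarsA_getD_self {α : Type} (L : List (Int × α)) (i : Int)
    (hv : String → Int × α → Bool) (vars : List String)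
    (g : PySem.Dict Int (PySem.Set Int)) :
    (vars.foldl (fun g var => L.foldl (fun g q =>
      if i = q.1 then g
      else if hv var q then g.modify i PySem.Set.empty (fun s => s.add q.1) else g) g) g).getD i
        PySem.Set.empty =
    vars.foldl (fun s var => L.foldl (fun s q =>
      if decide (i ≠ q.1) && hv var q then s.add q.1 else s) s) (g.getD i PySem.Set.empty) := by
  induction vars generalizing g with
  | nil => rfl
  | cons v vs ih => rw [List.foldl_cons, List.foldl_cons, ih, pvInnerA_getD_self]

theorem pvVarsA_keys {α : Type} (L : List (Int × α)) (i : Int)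
    (hv : String → Int × α → Bool) (vars : List String)
    (g : PySem.Dict Int (PySem.Set Int)) (hc : g.contains i = true) :
    (vars.foldl (fun g var => L.foldl (fun g q =>
      if i = q.1 then g
      else if hv var q then g.modify i PySem.Set.empty (fun s => s.add q.1) else g) g) g).keys =
      g.keys := by
  induction vars generalizing g with
  | nil => rfl
  | cons v vs ih =>
    rw [List.foldl_cons, ih _ (by
      rw [PySem.Dict.contains_iff_mem_keys, pvInnerA_keys _ _ _ _ hc,
        ← PySem.Dict.contains_iff_mem_keys]
      exact hc), pvInnerA_keys _ _ _ _ hc]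

-- the per-atom step of A: getD at other keys and keys are untouched,
-- getD at p.1 accumulates the attacked-set fold
theorem pvStepA_getD_ne (fds : List (PySem.Set String × PySem.Set String))
    (atoms : List (Bool × String × Int × List String))
    (g : PySem.Dict Int (PySem.Set Int)) (p : Int × (Bool × String × Int × List String))
    (k : Int) (hk : k ≠ p.1) :
    (pvStepA fds atoms g p).getD k PySem.Set.empty = g.getD k PySem.Set.empty :=
  pvVarsA_getD_ne (PySem.List.enumerate atoms) p.1
    (fun var q => (pvKeyOf q.2).any (fun attr =>
      !((pvKeyOf p.2).contains attr) && (pvReachA fds var).contains attr))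
    (pvKeyOf p.2) g k hk

theorem pvStepA_getD_self (fds : List (PySem.Set String × PySem.Set String))
    (atoms : List (Bool × String × Int × List String))
    (g : PySem.Dict Int (PySem.Set Int)) (p : Int × (Bool × String × Int × List String)) :
    (pvStepA fds atoms g p).getD p.1 PySem.Set.empty =
      (pvKeyOf p.2).foldl (fun s var =>
        (PySem.List.enumerate atoms).foldl (fun s q =>
          if decide (p.1 ≠ q.1) &&
             (pvKeyOf q.2).any (fun attr =>
               !((pvKeyOf p.2).contains attr) && (pvReachA fds var).contains attr)
          then s.add q.1 else s) s) (g.getD p.1 PySem.Set.empty) :=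
  pvVarsA_getD_self (PySem.List.enumerate atoms) p.1
    (fun var q => (pvKeyOf q.2).any (fun attr =>
      !((pvKeyOf p.2).contains attr) && (pvReachA fds var).contains attr))
    (pvKeyOf p.2) g

theorem pvStepA_keys (fds : List (PySem.Set String × PySem.Set String))
    (atoms : List (Bool × String × Int × List String))
    (g : PySem.Dict Int (PySem.Set Int)) (p : Int × (Bool × String × Int × List String))
    (hc : g.contains p.1 = true) : (pvStepA fds atoms g p).keys = g.keys :=
  pvVarsA_keys (PySem.List.enumerate atoms) p.1
    (fun var q => (pvKeyOf q.2).any (fun attr =>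
      !((pvKeyOf p.2).contains attr) && (pvReachA fds var).contains attr))
    (pvKeyOf p.2) g hc

-- ---- the i-loop of A: each index is written once, with pvStepA's value ----

theorem pvGraphA (fds : List (PySem.Set String × PySem.Set String))
    (atoms : List (Bool × String × Int × List String)) :
    ∀ (L : List (Int × (Bool × String × Int × List String)))
      (g : PySem.Dict Int (PySem.Set Int)),
      (L.map (·.1)).Nodup → (∀ p ∈ L, g.contains p.1 = true) →
      (L.foldl (pvStepA fds atoms) g).keys = g.keys ∧
      (∀ k : Int, (∀ p ∈ L, p.1 ≠ k) →
        (L.foldl (pvStepA fds atoms) g).getD k PySem.Set.empty = g.getD k PySem.Set.empty) ∧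
      (∀ p ∈ L, (L.foldl (pvStepA fds atoms) g).getD p.1 PySem.Set.empty =
        (pvKeyOf p.2).foldl (fun s var =>
          (PySem.List.enumerate atoms).foldl (fun s q =>
            if decide (p.1 ≠ q.1) &&
               (pvKeyOf q.2).any (fun attr =>
                 !((pvKeyOf p.2).contains attr) && (pvReachA fds var).contains attr)
            then s.add q.1 else s) s) (g.getD p.1 PySem.Set.empty)) := by
  intro L
  induction L with
  | nil => exact fun g _ _ => ⟨rfl, fun _ _ => rfl, fun p hp => absurd hp (by simp)⟩
  | cons p0 L ih =>
    intro g hnd hcont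
    have hc0 : g.contains p0.1 = true := hcont p0 List.mem_cons_self
    have hnd' : (L.map (·.1)).Nodup := (List.nodup_cons.mp hnd).2
    have hnotin : p0.1 ∉ L.map (·.1) := (List.nodup_cons.mp hnd).1
    have hcont' : ∀ p ∈ L, (pvStepA fds atoms g p0).contains p.1 = true := by
      intro p hp
      rw [PySem.Dict.contains_iff_mem_keys, pvStepA_keys fds atoms g p0 hc0,
        ← PySem.Dict.contains_iff_mem_keys]
      exact hcont p (List.mem_cons_of_mem _ hp)
    obtain ⟨ihk, ihne, ihself⟩ := ih (pvStepA fds atoms g p0) hnd' hcont'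
    rw [List.foldl_cons]
    refine ⟨ihk.trans (pvStepA_keys fds atoms g p0 hc0), ?_, ?_⟩
    · intro k hk
      rw [ihne k (fun p hp => hk p (List.mem_cons_of_mem _ hp)),
        pvStepA_getD_ne fds atoms g p0 k (Ne.symm (hk p0 List.mem_cons_self))]
    · intro p hp
      rcases List.mem_cons.mp hp with rfl | hp'
      · rw [ihne p.1 (fun p' hp' he => hnotin (he ▸ List.mem_map_of_mem hp')),
          pvStepA_getD_self]
      · rw [ihself p hp', pvStepA_getD_ne fds atoms g p0 p.1
          (fun he => hnotin (he ▸ List.mem_map_of_mem hp'))]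

-- ---- the initial graph {i: set() for i in range(n)} ----

theorem pvG0_get? (l : List Int) :
    ∀ (d : PySem.Dict Int (PySem.Set Int)),
      (∀ v, d.get? v = none ∨ d.get? v = some PySem.Set.empty) →
      ∀ v, (l.foldl (fun d i => d.insert i PySem.Set.empty) d).get? v = none ∨
        (l.foldl (fun d i => d.insert i PySem.Set.empty) d).get? v = some PySem.Set.empty := by
  induction l with
  | nil => exact fun d h => h
  | cons i l ih =>
    intro d h v
    rw [List.foldl_cons]
    refine ih _ ?_ v
    intro w
    rw [PySem.Dict.get?_insert]
    split
    · exact Or.inr rfl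
    · exact h w

theorem pvG0_getD (l : List Int) (v : Int) :
    (l.foldl (fun d i => d.insert i PySem.Set.empty)
      (PySem.Dict.empty : PySem.Dict Int (PySem.Set Int))).getD v PySem.Set.empty =
      PySem.Set.empty := by
  rcases pvG0_get? l _ (fun w => Or.inl (PySem.Dict.get?_empty w)) v with h | h <;>
    rw [PySem.Dict.getD_eq_get?_getD, h] <;> rfl

theorem pvG0_keys (l : List Int) (hnd : l.Nodup) :
    (l.foldl (fun d i => d.insert i PySem.Set.empty)
      (PySem.Dict.empty : PySem.Dict Int (PySem.Set Int))).keys = l := by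
  have h := PySem.Dict.keys_foldl_insert (κ := Int) (ν := PySem.Set Int) l
    (fun _ _ => PySem.Set.empty) PySem.Dict.empty
  refine Eq.trans h ?_
  rw [PySem.Dict.keys_empty, PySem.Set.update_nil_left, PySem.Set.ofList_eq_self_of_nodup _ hnd]

-- ---- enumerate bookkeeping ----

theorem pvEnum_map {α β : Type} (f : α → β) (l : List α) :
    ∀ s : Int, PySem.List.enumerate (l.map f) s =
      (PySem.List.enumerate l s).map (fun p => (p.1, f p.2)) := by
  induction l with
  | nil => intro s; rfl
  | cons x l ih =>
    intro s
    rw [List.map_cons, PySem.List.enumerate_cons, PySem.List.enumerate_cons, List.map_cons, ih]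

theorem pvEnum_mem {α : Type} (l : List α) :
    ∀ (s : Int) (p : Int × α), p ∈ PySem.List.enumerate l s → p.2 ∈ l := by
  induction l with
  | nil => intro s p hp; simp [PySem.List.enumerate] at hp
  | cons x l ih =>
    intro s p hp
    rw [PySem.List.enumerate_cons] at hp
    rcases List.mem_cons.mp hp with rfl | hp'
    · exact List.mem_cons_self
    · exact List.mem_cons_of_mem _ (ih (s + 1) p hp')

theorem pvEnum_fst {α : Type} (l : List α) (d : α) :
    (PySem.List.enumerate l).map (·.1) = PySem.List.pyRange 0 (l.length : Int) := by
  rw [PySem.List.enumerate_eq_map_pyRange l d, List.map_map]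
  have : PySem.List.len l = (l.length : Int) := rfl
  rw [this]
  exact (List.map_congr_left (fun a _ => rfl)).trans (List.map_id _)

theorem pvRange_nodup (n : Nat) : (PySem.List.pyRange 0 (n : Int)).Nodup := by
  rw [PySem.List.pyRange_zero_natCast]
  exact List.Nodup.map (fun a b h => Int.natCast_inj.mp h) List.nodup_range

-- ---- B's variable set and memo dict of closures ----

def pvVarsOf (keys : List (PySem.Set String)) : PySem.Set String :=
  keys.foldl (fun v key => v.union key) PySem.Set.empty

def pvClosures (fds : List (PySem.Set String × PySem.Set String)) (vars : PySem.Set String) :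
    PySem.Dict String (PySem.Set String) :=
  vars.foldl (fun d var => d.insert var (pvReachB fds var)) PySem.Dict.empty

def pvAttB (closD : PySem.Dict String (PySem.Set String)) (keys : List (PySem.Set String))
    (p : Int × PySem.Set String) : PySem.Set Int :=
  p.2.foldl (fun att var =>
    (PySem.List.enumerate keys).foldl (fun att q =>
      if decide (q.1 ≠ p.1) && !(q.2.isdisjoint ((closD.getD var PySem.Set.empty).diff p.2))
      then att.add q.1 else att) att) PySem.Set.empty

theorem pvPortB_eq (atoms : List (Bool × String × Int × List String)) :
    build_attack_graph_py_alt atoms =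
      ((PySem.List.enumerate (atoms.map pvKeyOf)).foldl
        (fun g p => g.insert p.1
          (pvAttB (pvClosures (pvFdsOf atoms) (pvVarsOf (atoms.map pvKeyOf)))
            (atoms.map pvKeyOf) p))
        PySem.Dict.empty).items := rfl

-- the union-fold only grows: old elements survive …
theorem pvFoldUnion_ext (keys : List (PySem.Set String)) :
    ∀ (acc : PySem.Set String) (x : String), x ∈ acc →
      x ∈ keys.foldl (fun v k => v.union k) acc := by
  induction keys with
  | nil => intro acc x hx; simpa using hx
  | cons k keys ih =>
    intro acc x hx
    rw [List.foldl_cons]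
    exact ih _ x ((PySem.Set.mem_union _ _ _).mpr (Or.inl hx))

-- … so every variable of every key is in `pvVarsOf keys`
theorem pvVarsOf_mem (keys : List (PySem.Set String)) :
    ∀ (acc : PySem.Set String) (key : PySem.Set String), key ∈ keys →
      ∀ x ∈ key, x ∈ keys.foldl (fun v k => v.union k) acc := by
  induction keys with
  | nil => intro acc key hk; simp at hk
  | cons k0 keys ih =>
    intro acc key hk x hx
    rw [List.foldl_cons]
    rcases List.mem_cons.mp hk with rfl | hk'
    · exact pvFoldUnion_ext keys _ x ((PySem.Set.mem_union _ _ _).mpr (Or.inr hx))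
    · exact ih (acc.union k0) key hk' x hx

-- fold-insert with a value that is a function of the key: lookup anywhere in the list
theorem pvGet?_foldl_insert_not_mem (l : List String)
    (f : String → PySem.Set String) :
    ∀ (d : PySem.Dict String (PySem.Set String)) (v : String), v ∉ l →
      (l.foldl (fun d var => d.insert var (f var)) d).get? v = d.get? v := by
  induction l with
  | nil => intro d v _; rfl
  | cons u l ih =>
    intro d v hv
    rw [List.foldl_cons, ih _ v (fun h => hv (List.mem_cons_of_mem _ h)),
      PySem.Dict.get?_insert]
    split
    · rename_i he; exact absurd (he ▸ List.mem_cons_self) hv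
    · rfl

theorem pvGet?_foldl_insert_mem (l : List String) (f : String → PySem.Set String) :
    ∀ (d : PySem.Dict String (PySem.Set String)) (v : String), v ∈ l →
      (l.foldl (fun d var => d.insert var (f var)) d).get? v = some (f v) := by
  induction l with
  | nil => intro d v hv; simp at hv
  | cons u l ih =>
    intro d v hv
    rw [List.foldl_cons]
    by_cases hl : v ∈ l
    · exact ih _ v hl
    · have : v = u := by
        rcases List.mem_cons.mp hv with h | h
        · exact h
        · exact absurd h hl
      subst this
      rw [pvGet?_foldl_insert_not_mem l f _ v hl, PySem.Dict.get?_insert]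
      simp

theorem pvClosures_getD (fds : List (PySem.Set String × PySem.Set String))
    (vars : PySem.Set String) (var : String) (h : var ∈ vars) :
    (pvClosures fds vars).getD var PySem.Set.empty = pvReachB fds var :=
  PySem.Dict.getD_of_get?_eq_some _ _
    (pvGet?_foldl_insert_mem vars (pvReachB fds) PySem.Dict.empty var h)

-- ---- the attack test: A's any-loop equals B's disjointness test ----

theorem pvHit_eq (key_i kj ra rb : PySem.Set String) (hr : ∀ x, x ∈ ra ↔ x ∈ rb) :
    (kj.any fun attr => !(key_i.contains attr) && ra.contains attr) =
      !(kj.isdisjoint (rb.diff key_i)) := by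
  rw [Bool.eq_iff_iff, List.any_eq_true]
  constructor
  · rintro ⟨x, hx, hcond⟩
    obtain ⟨h1, h2⟩ := (Bool.and_eq_true _ _).mp hcond
    have hxa : x ∈ ra := (PySem.Set.contains_iff _ _).mp h2
    have hxk : x ∉ key_i := by
      intro hmem
      rw [(PySem.Set.contains_iff _ _).mpr hmem] at h1
      simp at h1
    cases hdis : kj.isdisjoint (rb.diff key_i) with
    | false => simp
    | true =>
      have := (PySem.Set.isdisjoint_iff _ _).mp hdis x hx
      exact absurd ((PySem.Set.mem_diff _ _ _).mpr ⟨(hr x).mp hxa, hxk⟩) this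
  · intro hdis
    cases hd : kj.isdisjoint (rb.diff key_i) with
    | true => rw [hd] at hdis; simp at hdis
    | false =>
      have : ¬ ∀ x ∈ kj, x ∉ rb.diff key_i := by
        intro hall
        rw [(PySem.Set.isdisjoint_iff _ _).mpr hall] at hd
        cases hd
      push_neg at this
      obtain ⟨x, hx, hxd⟩ := this
      obtain ⟨hxb, hxk⟩ := (PySem.Set.mem_diff _ _ _).mp hxd
      refine ⟨x, hx, (Bool.and_eq_true _ _).mpr ⟨?_, (PySem.Set.contains_iff _ _).mpr ((hr x).mpr hxb)⟩⟩
      cases hc : key_i.contains x with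
      | false => rfl
      | true => exact absurd ((PySem.Set.contains_iff _ _).mp hc) hxk

-- ---- main equality ----

theorem pvMain (atoms : List (Bool × String × Int × List String)) :
    build_attack_graph_py atoms = build_attack_graph_py_alt atoms := by
  rw [pvPortA_eq, pvPortB_eq]
  have hEfst : (PySem.List.enumerate atoms).map (·.1) =
      PySem.List.pyRange 0 (atoms.length : Int) := pvEnum_fst atoms (false, "", 0, [])
  have hndE : ((PySem.List.enumerate atoms).map (·.1)).Nodup := by
    rw [hEfst]; exact pvRange_nodup _
  have hEK : PySem.List.enumerate (atoms.map pvKeyOf) 0 =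
      (PySem.List.enumerate atoms).map (fun p => (p.1, pvKeyOf p.2)) := pvEnum_map pvKeyOf atoms 0
  have hg0keys : ((PySem.List.pyRange 0 (atoms.length : Int)).foldl
      (fun d i => d.insert i PySem.Set.empty) PySem.Dict.empty).keys =
      PySem.List.pyRange 0 (atoms.length : Int) := pvG0_keys _ (pvRange_nodup _)
  have hcont0 : ∀ p ∈ PySem.List.enumerate atoms,
      ((PySem.List.pyRange 0 (atoms.length : Int)).foldl
        (fun d i => d.insert i PySem.Set.empty)
        (PySem.Dict.empty : PySem.Dict Int (PySem.Set Int))).contains p.1 = true := by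
    intro p hp
    rw [PySem.Dict.contains_iff_mem_keys, hg0keys, ← hEfst]
    exact List.mem_map_of_mem hp
  obtain ⟨hkeysA, hneA, hselfA⟩ := pvGraphA (pvFdsOf atoms) atoms (PySem.List.enumerate atoms)
    ((PySem.List.pyRange 0 (atoms.length : Int)).foldl
      (fun d i => d.insert i PySem.Set.empty)
      (PySem.Dict.empty : PySem.Dict Int (PySem.Set Int))) hndE hcont0
  -- A's items
  have hitemsA :
      ((PySem.List.enumerate atoms).foldl (pvStepA (pvFdsOf atoms) atoms)
        ((PySem.List.pyRange 0 (atoms.length : Int)).foldl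
          (fun d i => d.insert i PySem.Set.empty)
          (PySem.Dict.empty : PySem.Dict Int (PySem.Set Int)))).items =
      (PySem.List.enumerate atoms).map (fun p => (p.1,
        ((PySem.List.enumerate atoms).foldl (pvStepA (pvFdsOf atoms) atoms)
          ((PySem.List.pyRange 0 (atoms.length : Int)).foldl
            (fun d i => d.insert i PySem.Set.empty)
            (PySem.Dict.empty : PySem.Dict Int (PySem.Set Int)))).getD p.1 PySem.Set.empty)) := by
    rw [PySem.Dict.items_eq_map_keys _ (by rw [hkeysA, hg0keys]; exact pvRange_nodup _)
      PySem.Set.empty, hkeysA, hg0keys, ← hEfst, List.map_map]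
    rfl
  -- B's items
  have hitemsB :
      ((PySem.List.enumerate (atoms.map pvKeyOf)).foldl
        (fun g p => g.insert p.1
          (pvAttB (pvClosures (pvFdsOf atoms) (pvVarsOf (atoms.map pvKeyOf)))
            (atoms.map pvKeyOf) p))
        PySem.Dict.empty).items =
      (PySem.List.enumerate atoms).map (fun p => (p.1,
        pvAttB (pvClosures (pvFdsOf atoms) (pvVarsOf (atoms.map pvKeyOf))) (atoms.map pvKeyOf)
          (p.1, pvKeyOf p.2))) := by
    rw [PySem.Dict.items_foldl_insert_fresh (PySem.List.enumerate (atoms.map pvKeyOf)) (·.1)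
      (fun p => pvAttB (pvClosures (pvFdsOf atoms) (pvVarsOf (atoms.map pvKeyOf)))
        (atoms.map pvKeyOf) p)
      PySem.Dict.empty (fun a _ => PySem.Dict.contains_empty a.1)
      (by rw [hEK, List.map_map]; exact hndE),
      show (PySem.Dict.empty : PySem.Dict Int (PySem.Set Int)).items = [] from rfl,
      List.nil_append, hEK, List.map_map]
    rfl
  rw [hitemsA, hitemsB]
  refine List.map_congr_left ?_
  intro p hp
  refine congrArg (Prod.mk p.1) ?_
  rw [hselfA p hp, pvG0_getD]
  show _ = pvAttB (pvClosures (pvFdsOf atoms) (pvVarsOf (atoms.map pvKeyOf)))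
    (atoms.map pvKeyOf) (p.1, pvKeyOf p.2)
  simp only [pvAttB]
  refine PySem.List.foldl_congr_mem (pvKeyOf p.2) _ _ PySem.Set.empty ?_
  intro acc var hvar
  rw [hEK, List.foldl_map]
  refine PySem.List.foldl_congr_mem (PySem.List.enumerate atoms) _ _ acc ?_
  intro acc' q _
  have hvmem : var ∈ pvVarsOf (atoms.map pvKeyOf) :=
    pvVarsOf_mem (atoms.map pvKeyOf) PySem.Set.empty (pvKeyOf p.2)
      (List.mem_map_of_mem (pvEnum_mem atoms 0 p hp)) var hvar
  rw [pvClosures_getD (pvFdsOf atoms) (pvVarsOf (atoms.map pvKeyOf)) var hvmem]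
  have hcond : (decide (p.1 ≠ q.1) &&
      (pvKeyOf q.2).any (fun attr =>
        !((pvKeyOf p.2).contains attr) && (pvReachA (pvFdsOf atoms) var).contains attr)) =
      (decide (q.1 ≠ p.1) &&
        !((pvKeyOf q.2).isdisjoint ((pvReachB (pvFdsOf atoms) var).diff (pvKeyOf p.2)))) := by
    have h1 : decide (p.1 ≠ q.1) = decide (q.1 ≠ p.1) := by
      by_cases h : p.1 = q.1 <;> simp [h, Ne, eq_comm]
    rw [h1, pvHit_eq (pvKeyOf p.2) (pvKeyOf q.2) (pvReachA (pvFdsOf atoms) var)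
      (pvReachB (pvFdsOf atoms) var)
      (fun x => pvClos_eq (pvFdsOf atoms) (PySem.Set.ofList [var]) x)]
  rw [hcond]

-- ===== VERDICT (by name: the statement is the Claim_ definition above) =====
theorem build_attack_graph_py_spec : Claim_equal_build_attack_graph_py := by
  intro atoms _
  show build_attack_graph_py atoms = build_attack_graph_py_alt atoms
  exact pvMain atoms
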